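-- pv_equiv track=rewrite | github.com/comhappy/solvingAlgorithm | Baekjoon/pythonAlgorithm/implement/14500.py | check_tetromino1
-- ===== SOURCE A (Python) =====
-- def check_tetromino1(paper):
--     max_num = 0
--
--     for i in range(len(paper)): # 세로로 탐색   (세로개수 - 테트로미노의 세로길이 + 1)
--         for j in range(len(paper[0]) - 3):
--             num_sum = paper[i][j] + paper[i][j + 1] + paper[i][j + 2] + paper[i][j + 3]
--
--             if num_sum > max_num:
--                 max_num = num_sum
--
--     return max_num
-- ===== SOURCE B (Python) =====
-- def check_tetromino1(paper):
--     best = 0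
--     if not paper:
--         return 0
--     w = len(paper[0])
--     if w >= 4:
--         for row in paper:
--             s = row[0] + row[1] + row[2] + row[3]
--             if s > best:
--                 best = s
--             for j in range(w - 4):
--                 s += row[j + 4] - row[j]
--                 if s > best:
--                     best = s
--     return best
-- ===== Notes on version B (the rewrite author's own statement) =====
-- stated objective: alternative
-- what changed: B replaces A's per-position re-addition of four cells with a sliding-window running sum (subtract the cell leaving, add the cell entering) per row, with an early exit for empty grids and widths below 4.
import Mathlib
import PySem

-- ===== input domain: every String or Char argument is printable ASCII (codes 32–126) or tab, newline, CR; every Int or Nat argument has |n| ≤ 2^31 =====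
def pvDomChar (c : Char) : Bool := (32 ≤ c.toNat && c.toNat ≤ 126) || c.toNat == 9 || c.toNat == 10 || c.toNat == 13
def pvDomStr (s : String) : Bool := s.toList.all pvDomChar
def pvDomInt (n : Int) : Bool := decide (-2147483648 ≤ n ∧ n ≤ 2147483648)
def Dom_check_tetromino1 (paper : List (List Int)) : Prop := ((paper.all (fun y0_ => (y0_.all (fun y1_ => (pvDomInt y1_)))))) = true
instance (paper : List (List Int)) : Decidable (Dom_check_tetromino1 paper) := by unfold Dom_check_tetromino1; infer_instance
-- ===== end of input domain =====

-- B replaces A's per-position re-addition of four cells with a per-row sliding-window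
-- running sum; objective: alternative decomposition (same asymptotic cost).

-- ===== PORT A =====
def check_tetromino1 (paper : List (List Int)) : Int :=
  (PySem.List.pyRange 0 paper.length 1).foldl (fun max_num i =>
    let row := PySem.List.pyGetD paper i []
    (PySem.List.pyRange 0 (((PySem.List.pyGetD paper 0 []).length : Int) - 3) 1).foldl
      (fun max_num j =>
        let num_sum := PySem.List.pyGetD row j 0 + PySem.List.pyGetD row (j + 1) 0 +
          PySem.List.pyGetD row (j + 2) 0 + PySem.List.pyGetD row (j + 3) 0
        if num_sum > max_num then num_sum else max_num) max_num) 0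

-- ===== PORT B =====
def check_tetromino1_alt (paper : List (List Int)) : Int :=
  match paper with
  | [] => 0
  | r0 :: _ =>
    let w : Int := r0.length
    if w ≥ 4 then
      paper.foldl (fun best row =>
        let s := PySem.List.pyGetD row 0 0 + PySem.List.pyGetD row 1 0 +
          PySem.List.pyGetD row 2 0 + PySem.List.pyGetD row 3 0
        let best1 := if s > best then s else best
        ((PySem.List.pyRange 0 (w - 4) 1).foldl (fun sb j =>
          let s' := sb.1 + PySem.List.pyGetD row (j + 4) 0 - PySem.List.pyGetD row j 0
          (s', if s' > sb.2 then s' else sb.2)) (s, best1)).2) 0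
    else 0

-- ===== PRECONDITION & SPEC =====
-- Pre_ excludes exactly the inputs on which Python A raises IndexError: a non-empty
-- grid whose first row has width ≥ 4 while some row is shorter than that width.
def Pre_check_tetromino1 (paper : List (List Int)) : Prop :=
  paper = [] ∨ (paper.headD []).length < 4 ∨
    ∀ row ∈ paper, (paper.headD []).length ≤ row.length
instance (paper : List (List Int)) : Decidable (Pre_check_tetromino1 paper) := by
  unfold Pre_check_tetromino1; infer_instance
def pvWitness_check_tetromino1 : List (List Int) := [[1, 2, 3, 4], [5, -1, 0, 2]]
def Spec_check_tetromino1 (paper : List (List Int)) (out : Int) : Prop := out = check_tetromino1_alt paper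
instance (paper : List (List Int)) (out : Int) : Decidable (Spec_check_tetromino1 paper out) := by unfold Spec_check_tetromino1; infer_instance

-- ===== CLAIM (what is proved, stated in full; the proofs are below) =====
def Claim_equal_check_tetromino1 : Prop := ∀ (paper : List (List Int)), Dom_check_tetromino1 paper → Pre_check_tetromino1 paper → Spec_check_tetromino1 paper (check_tetromino1 paper)

-- ===== LEMMAS AND PROOFS =====

-- window sum starting at j, read through pyGetD (total; equality of the two loop
-- shapes below holds for every row, so Pre_ is only needed for fidelity to Python)
def pvWin (row : List Int) (j : Int) : Int :=
  PySem.List.pyGetD row j 0 + PySem.List.pyGetD row (j + 1) 0 +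
    PySem.List.pyGetD row (j + 2) 0 + PySem.List.pyGetD row (j + 3) 0

theorem pvWin_slide (row : List Int) (j : Int) :
    pvWin row j + PySem.List.pyGetD row (j + 4) 0 - PySem.List.pyGetD row j 0
      = pvWin row (j + 1) := by
  unfold pvWin
  have h2 : j + 1 + 1 = j + 2 := by ring
  have h3 : j + 1 + 2 = j + 3 := by ring
  have h4 : j + 1 + 3 = j + 4 := by ring
  rw [h2, h3, h4]; ring

-- invariant of B's sliding loop vs A's recomputing loop, per row
theorem pv_inner (row : List Int) (acc : Int) (n : ℕ) :
    (PySem.List.pyRange 0 (n : Int) 1).foldl (fun sb j =>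
        let s' := sb.1 + PySem.List.pyGetD row (j + 4) 0 - PySem.List.pyGetD row j 0
        (s', if s' > sb.2 then s' else sb.2))
      (pvWin row 0, if pvWin row 0 > acc then pvWin row 0 else acc)
    = (pvWin row (n : Int),
       (PySem.List.pyRange 0 ((n : Int) + 1) 1).foldl
         (fun m j => if pvWin row j > m then pvWin row j else m) acc) := by
  induction n with
  | zero =>
    have h1 : PySem.List.pyRange 0 ((0:ℕ):Int) 1 = [] :=
      PySem.List.pyRange_one_eq_nil (by norm_num)
    have h2 : PySem.List.pyRange 0 (((0:ℕ):Int) + 1) 1 = [0] := by decide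
    rw [h1, h2]
    simp
  | succ n ih =>
    have hcast : ((n + 1 : ℕ) : Int) = (n : Int) + 1 := by push_cast; ring
    rw [hcast]
    rw [PySem.List.pyRange_one_succ_right (by positivity), List.foldl_append, ih]
    rw [PySem.List.pyRange_one_succ_right (a := 0) (b := (n : Int) + 1) (by positivity),
      List.foldl_append]
    simp only [List.foldl_cons, List.foldl_nil]
    rw [pvWin_slide]

-- A's per-row loop equals B's per-row loop when the width is ≥ 4
theorem pv_row (row : List Int) (acc : Int) (w : Int) (hw : 4 ≤ w) :
    (PySem.List.pyRange 0 (w - 3) 1).foldl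
        (fun m j => if pvWin row j > m then pvWin row j else m) acc
    = ((PySem.List.pyRange 0 (w - 4) 1).foldl (fun sb j =>
        let s' := sb.1 + PySem.List.pyGetD row (j + 4) 0 - PySem.List.pyGetD row j 0
        (s', if s' > sb.2 then s' else sb.2))
      (pvWin row 0, if pvWin row 0 > acc then pvWin row 0 else acc)).2 := by
  obtain ⟨n, hn⟩ : ∃ n : ℕ, w - 4 = (n : Int) := ⟨(w - 4).toNat, by omega⟩
  have hn3 : w - 3 = (n : Int) + 1 := by omega
  rw [hn3, hn, pv_inner]

-- A's outer index loop is a fold over the rows themselves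
theorem pv_outer (paper : List (List Int)) (W : Int) (init : Int) :
    (PySem.List.pyRange 0 paper.length 1).foldl (fun max_num i =>
      (PySem.List.pyRange 0 (W - 3) 1).foldl
        (fun m j => if pvWin (PySem.List.pyGetD paper i []) j > m
          then pvWin (PySem.List.pyGetD paper i []) j else m) max_num) init
    = paper.foldl (fun max_num row =>
      (PySem.List.pyRange 0 (W - 3) 1).foldl
        (fun m j => if pvWin row j > m then pvWin row j else m) max_num) init := by
  have := PySem.List.foldl_pyRange_pyGetD (xs := paper) (a := 0) (d := ([] : List Int))
    (f := fun (acc : Int) (row : List Int) =>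
      (PySem.List.pyRange 0 (W - 3) 1).foldl
        (fun m j => if pvWin row j > m then pvWin row j else m) acc)
    (init := init) (by omega)
  simpa using this

theorem pv_main (paper : List (List Int)) (h : Pre_check_tetromino1 paper) :
    check_tetromino1 paper = check_tetromino1_alt paper := by
  unfold check_tetromino1 check_tetromino1_alt
  cases paper with
  | nil => simp
  | cons r0 rest =>
    simp only [PySem.List.pyGetD_zero_cons]
    rw [show (fun (max_num : Int) (i : Int) =>
      (PySem.List.pyRange 0 ((r0.length : Int) - 3) 1).foldl
        (fun max_num j =>
          let row := PySem.List.pyGetD (r0 :: rest) i []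
          let num_sum := PySem.List.pyGetD row j 0 + PySem.List.pyGetD row (j + 1) 0 +
            PySem.List.pyGetD row (j + 2) 0 + PySem.List.pyGetD row (j + 3) 0
          if num_sum > max_num then num_sum else max_num) max_num)
      = (fun (max_num : Int) (i : Int) =>
      (PySem.List.pyRange 0 ((r0.length : Int) - 3) 1).foldl
        (fun m j => if pvWin (PySem.List.pyGetD (r0 :: rest) i []) j > m
          then pvWin (PySem.List.pyGetD (r0 :: rest) i []) j else m) max_num)
      from by funext a i; simp [pvWin]]
    rw [pv_outer (r0 :: rest) (r0.length : Int) 0]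
    by_cases hw : (r0.length : Int) ≥ 4
    · rw [if_pos hw]
      apply PySem.List.foldl_congr_mem
      intro acc row _
      have h := pv_row row acc (r0.length : Int) hw
      simpa [pvWin] using h
    · rw [if_neg hw]
      have hnil : PySem.List.pyRange 0 ((r0.length : Int) - 3) 1 = [] :=
        PySem.List.pyRange_one_eq_nil (by omega)
      rw [hnil]
      simp

-- ===== VERDICT (by name: the statement is the Claim_ definition above) =====
theorem check_tetromino1_spec : Claim_equal_check_tetromino1 := by
  intro paper _ hpre
  exact pv_main paper hpre
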